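-- pv_equiv track=rewrite | github.com/cscosu/buckeyectf-2023-public | rev-8ball/gen_data.py | enc_flag
-- ===== SOURCE A (Python) =====
-- otp = [161, 143, 215, 178, 242, 250, 72, 57, 107, 194, 146, 16, 88, 68, 101, 140, 74, 117, 86, 11, 102, 81, 104, 137, 141, 12, 253, 141, 103, 34, 223, 15, 202, 143, 155, 37, 185]
--
-- def enc_flag(data):
--     data = [ord(c) for c in data]
--
--     data = [x ^ y for x, y in zip(data, otp)]
--
--     data = [c ^ 0x69 for c in data]
--
--     flag2 = data.copy()
--     for k in range(1, len(data)):
--         flag2[k] = data[k] ^ flag2[k-1]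
--
--     return flag2
-- ===== SOURCE B (Python) =====
-- otp = [161, 143, 215, 178, 242, 250, 72, 57, 107, 194, 146, 16, 88, 68, 101, 140, 74, 117, 86, 11, 102, 81, 104, 137, 141, 12, 253, 141, 103, 34, 223, 15, 202, 143, 155, 37, 185]
--
-- def enc_flag(data):
--     out = []
--     acc = 0
--     for c, k in zip(data, otp):
--         acc ^= ord(c) ^ k ^ 0x69
--         out.append(acc)
--     return out
-- ===== Notes on version B (the rewrite author's own statement) =====
-- stated objective: simpler
-- what changed: Fused A's four passes (ord list, XOR with otp, XOR with 0x69, in-place prefix-XOR loop over indices) into one pass over zip(data, otp) that threads a running XOR accumulator and appends it.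
import Mathlib
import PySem

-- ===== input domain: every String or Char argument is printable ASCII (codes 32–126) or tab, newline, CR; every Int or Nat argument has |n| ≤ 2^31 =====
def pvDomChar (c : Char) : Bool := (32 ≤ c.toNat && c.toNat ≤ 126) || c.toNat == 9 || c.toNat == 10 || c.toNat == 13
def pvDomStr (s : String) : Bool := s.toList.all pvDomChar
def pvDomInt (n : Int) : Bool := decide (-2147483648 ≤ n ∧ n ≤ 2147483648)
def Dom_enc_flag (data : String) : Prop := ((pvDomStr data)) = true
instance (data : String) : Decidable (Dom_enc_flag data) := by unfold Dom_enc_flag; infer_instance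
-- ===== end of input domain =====

-- B fuses A's four passes into one accumulator pass over zip(data, otp); same return value, simpler (not faster).

def pvOtp : List Nat := [161, 143, 215, 178, 242, 250, 72, 57, 107, 194, 146, 16, 88, 68, 101, 140, 74, 117, 86, 11, 102, 81, 104, 137, 141, 12, 253, 141, 103, 34, 223, 15, 202, 143, 155, 37, 185]

-- ===== PORT A =====
-- literal transliteration of A: ord list, XOR with otp (zip truncates), XOR 0x69,
-- then `for k in range(1, len(data)): flag2[k] = data[k] ^ flag2[k-1]` as a foldl over the index range with set/getD.
def enc_flag (data : String) : List Int :=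
  let d1 : List Nat := data.toList.map (fun c => c.toNat)
  let d2 : List Nat := (d1.zip pvOtp).map (fun p => p.1 ^^^ p.2)
  let d3 : List Nat := d2.map (fun c => c ^^^ 0x69)
  let flag2 : List Nat :=
    (List.range' 1 (d3.length - 1)).foldl
      (fun f k => f.set k ((d3.getD k 0) ^^^ (f.getD (k - 1) 0))) d3
  flag2.map (fun n => (n : Int))

-- ===== PORT B =====
-- literal transliteration of B: single fold over zip(data, otp) threading (acc, out).
def enc_flag_alt (data : String) : List Int :=
  let r : Nat × List Nat :=
    (data.toList.zip pvOtp).foldl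
      (fun st p =>
        let acc := st.1 ^^^ (p.1.toNat ^^^ p.2 ^^^ 0x69)
        (acc, st.2 ++ [acc])) (0, [])
  r.2.map (fun n => (n : Int))

-- ===== PRECONDITION & SPEC =====
def Spec_enc_flag (data : String) (out : List Int) : Prop := out = enc_flag_alt data
instance (data : String) (out : List Int) : Decidable (Spec_enc_flag data out) := by unfold Spec_enc_flag; infer_instance

-- ===== CLAIM (what is proved, stated in full; the proofs are below) =====
def Claim_equal_enc_flag : Prop := ∀ (data : String), Dom_enc_flag data → Spec_enc_flag data (enc_flag data)

-- ===== LEMMAS AND PROOFS =====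

/-- The prefix-XOR sequence starting from accumulator `a`. -/
def pvQ (a : Nat) : List Nat → List Nat
  | [] => []
  | t :: ys => (a ^^^ t) :: pvQ (a ^^^ t) ys

theorem pvB_fold (xs : List Nat) : ∀ (a : Nat) (l : List Nat),
    (xs.foldl (fun (st : Nat × List Nat) t =>
        (st.1 ^^^ t, st.2 ++ [st.1 ^^^ t])) (a, l)).2 = l ++ pvQ a xs := by
  induction xs with
  | nil => intro a l; simp [pvQ]
  | cons t ys ih => intro a l; simp [pvQ, List.foldl_cons, ih (a ^^^ t) (l ++ [a ^^^ t])]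

theorem pvA_loop (rest : List Nat) : ∀ (done orig : List Nat) (a : Nat),
    done.length = orig.length → done.getLast? = some a →
    ((List.range' done.length rest.length).foldl
      (fun f k => f.set k (((orig ++ rest).getD k 0) ^^^ (f.getD (k - 1) 0))) (done ++ rest))
      = done ++ pvQ a rest := by
  induction rest with
  | nil => intro done orig a _ _; simp [pvQ]
  | cons t rs ih =>
    intro done orig a hlen hlast
    have hjpos : 0 < done.length := by
      cases done with
      | nil => simp at hlast
      | cons x xs => simp
    have hget : ((orig ++ t :: rs).getD done.length 0) = t := by
      rw [hlen]
      simp [List.getD]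
    have hgetf : ((done ++ t :: rs).getD (done.length - 1) 0) = a := by
      have h1 : done.length - 1 < done.length := Nat.sub_lt hjpos (by norm_num)
      rw [List.getD, List.getElem?_append_left h1]
      rw [List.getLast?_eq_getElem?] at hlast
      simp [hlast]
    have hset : (done ++ t :: rs).set done.length (t ^^^ a)
        = (done ++ [t ^^^ a]) ++ rs := by
      rw [List.set_append_right _ _ (Nat.le_refl _)]
      simp
    have hrange : List.range' done.length (t :: rs).length
        = done.length :: List.range' (done.length + 1) rs.length := by
      simp [List.range'_succ]
    rw [hrange, List.foldl_cons, hget, hgetf, hset]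
    have hlen' : (done ++ [t ^^^ a]).length = (orig ++ [t]).length := by simp [hlen]
    have hlast' : (done ++ [t ^^^ a]).getLast? = some (t ^^^ a) := by simp
    have hxs : orig ++ t :: rs = (orig ++ [t]) ++ rs := by simp
    have hstart : (done ++ [t ^^^ a]).length = done.length + 1 := by simp
    have := ih (done ++ [t ^^^ a]) (orig ++ [t]) (t ^^^ a) hlen' hlast'
    rw [hstart, ← hxs] at this
    rw [this]
    simp [pvQ, Nat.xor_comm a t]

theorem pvD3_eq (cs : List Char) :
    (((cs.map (fun c => c.toNat)).zip pvOtp).map (fun p => p.1 ^^^ p.2)).map (fun c => c ^^^ 0x69)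
      = (cs.zip pvOtp).map (fun p => p.1.toNat ^^^ p.2 ^^^ 0x69) := by
  rw [List.zip_map_left]
  simp [List.map_map, Function.comp]

theorem pvA_eq_Q (xs : List Nat) :
    (List.range' 1 (xs.length - 1)).foldl
      (fun f k => f.set k ((xs.getD k 0) ^^^ (f.getD (k - 1) 0))) xs = pvQ 0 xs := by
  cases xs with
  | nil => simp [pvQ]
  | cons t ys =>
    simp only [List.length_cons, Nat.add_sub_cancel]
    have := pvA_loop ys [t] [t] t (by simp) (by simp)
    simpa [pvQ, Nat.zero_xor] using this

theorem pvB_eq_Q (zs : List (Char × Nat)) :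
    (zs.foldl
        (fun (st : Nat × List Nat) p =>
          (st.1 ^^^ (p.1.toNat ^^^ p.2 ^^^ 0x69),
           st.2 ++ [st.1 ^^^ (p.1.toNat ^^^ p.2 ^^^ 0x69)])) (0, [])).2
      = pvQ 0 (zs.map (fun p => p.1.toNat ^^^ p.2 ^^^ 0x69)) := by
  rw [show pvQ 0 (zs.map (fun p => p.1.toNat ^^^ p.2 ^^^ 0x69))
        = [] ++ pvQ 0 (zs.map (fun p => p.1.toNat ^^^ p.2 ^^^ 0x69)) from rfl,
      ← pvB_fold, List.foldl_map]

-- ===== VERDICT (by name: the statement is the Claim_ definition above) =====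
theorem enc_flag_spec : Claim_equal_enc_flag := by
  intro data _
  unfold Spec_enc_flag enc_flag enc_flag_alt
  simp only [pvD3_eq, pvA_eq_Q, pvB_eq_Q]
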